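-- pv_equiv track=rewrite | github.com/cwayush/data_structure_algorithms | Array/Measurement of Array.py | user_logic
-- ===== SOURCE A (Python) =====
-- from collections import defaultdict
--
-- def user_logic(n, arr):
--     mapp = defaultdict(int)
--     new_arr = sorted(arr)
--
--     for i,num in enumerate(new_arr):
--         mapp[num] = i
--
--     sanity = 0
--     for i,num in enumerate(arr):
--         sanity += (i + mapp[num])
--
--     return sanity
-- ===== SOURCE B (Python) =====
-- def user_logic(n, arr):
--     # Closed form: the index sum is m*(m-1)//2 and the rank of v is
--     # (# x <= v) - 1, whose total over arr is (m*(m-1) + ties)/2 + m - m where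
--     # ties = # ordered equal pairs (i != j); so the answer collapses to
--     # m*(m-1) + (# unordered tied pairs), counted in one pass with a dict.
--     ties = 0
--     seen = {}
--     for v in arr:
--         t = seen.get(v, 0)
--         ties += t
--         seen[v] = t + 1
--     m = len(arr)
--     return m * (m - 1) + ties
-- ===== Notes on version B (the rewrite author's own statement) =====
-- stated objective: faster
-- what changed: Replaces the sort-plus-rank-dictionary computation by a closed form: the answer equals m*(m-1) plus the number of unordered tied pairs, counted in a single O(n) pass with a running multiplicity dict (no sort, no rank table, no second enumeration).
import Mathlib
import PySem

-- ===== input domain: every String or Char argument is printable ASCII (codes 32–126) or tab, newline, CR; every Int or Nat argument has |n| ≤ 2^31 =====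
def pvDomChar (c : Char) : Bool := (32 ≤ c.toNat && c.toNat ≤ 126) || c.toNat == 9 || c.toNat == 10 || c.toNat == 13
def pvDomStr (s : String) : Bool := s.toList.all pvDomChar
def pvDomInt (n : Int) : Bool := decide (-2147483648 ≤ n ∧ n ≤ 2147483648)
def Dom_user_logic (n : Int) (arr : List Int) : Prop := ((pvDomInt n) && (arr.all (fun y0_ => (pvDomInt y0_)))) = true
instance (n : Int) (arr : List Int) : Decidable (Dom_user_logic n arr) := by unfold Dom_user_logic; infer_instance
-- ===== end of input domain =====

-- B replaces A's sort-and-rank-dictionary computation by the closed form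
-- m*(m-1) + (# unordered tied pairs), counted in a single pass with a running
-- multiplicity dict; same return value, measured faster on large inputs.


-- ===== PORT A =====
-- mapp = defaultdict(int); for i,num in enumerate(sorted(arr)): mapp[num] = i
-- sanity = 0; for i,num in enumerate(arr): sanity += i + mapp[num]
-- (every key looked up is present, so defaultdict's 0 default is never the value used)
def user_logic (n : Int) (arr : List Int) : Int :=
  let new_arr := PySem.List.sorted arr (fun x => x) false
  let mapp := (PySem.List.enumerate new_arr).foldl
      (fun (d : PySem.Dict Int Int) (p : Int × Int) => d.insert p.2 p.1) PySem.Dict.empty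
  (PySem.List.enumerate arr).foldl
      (fun (s : Int) (p : Int × Int) => s + (p.1 + mapp.getD p.2 0)) 0

-- ===== PORT B =====
-- ties = 0; seen = {}
-- for v in arr: t = seen.get(v, 0); ties += t; seen[v] = t + 1
-- m = len(arr); return m*(m-1) + ties
def pvTieFold (arr : List Int) : Int × PySem.Dict Int Int :=
  arr.foldl (fun (s : Int × PySem.Dict Int Int) v =>
    (s.1 + s.2.getD v 0, s.2.insert v (s.2.getD v 0 + 1))) (0, PySem.Dict.empty)

def user_logic_alt (n : Int) (arr : List Int) : Int :=
  let ties := (pvTieFold arr).1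
  let m : Int := PySem.List.len arr
  m * (m - 1) + ties

-- ===== PRECONDITION & SPEC =====
def Spec_user_logic (n : Int) (arr : List Int) (out : Int) : Prop := out = user_logic_alt n arr
instance (n : Int) (arr : List Int) (out : Int) : Decidable (Spec_user_logic n arr out) := by unfold Spec_user_logic; infer_instance

-- ===== CLAIM (what is proved, stated in full; the proofs are below) =====
def Claim_equal_user_logic : Prop := ∀ (n : Int) (arr : List Int), Dom_user_logic n arr → Spec_user_logic n arr (user_logic n arr)

-- ===== LEMMAS AND PROOFS =====

-- After the first loop of A, the dict maps each v ∈ s (s sorted ascending) to its LAST index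
-- in s, which is (count of elements ≤ v) - 1.
lemma getD_fold_insert (s : List Int) (hs : s.Pairwise (· ≤ ·)) (v : Int) (hv : v ∈ s) :
    ((PySem.List.enumerate s).foldl
        (fun (d : PySem.Dict Int Int) (p : Int × Int) => d.insert p.2 p.1)
        PySem.Dict.empty).getD v 0
      = ((s.countP (fun x => decide (x ≤ v)) : Int)) - 1 := by
  induction s using List.reverseRecOn with
  | nil => simp at hv
  | append_singleton t x ih =>
    rw [List.pairwise_append] at hs
    obtain ⟨ht, -, hle⟩ := hs
    rw [PySem.List.enumerate_append, List.foldl_append]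
    simp only [PySem.List.enumerate, List.foldl]
    rw [PySem.Dict.getD_insert]
    rw [List.countP_append]
    by_cases hx : v = x
    · subst hx
      have : t.countP (fun x => decide (x ≤ v)) = t.length :=
        List.countP_eq_length.mpr (fun y hy => by simpa using hle y hy _ (List.mem_singleton_self _))
      simp [this]
    · have hvt : v ∈ t := by
        rcases List.mem_append.mp hv with h | h
        · exact h
        · simp at h; exact absurd h hx
      have hvx : v < x := lt_of_le_of_ne (hle v hvt x (by simp)) hx
      have hnx : ¬ x ≤ v := not_le.mpr hvx
      rw [if_neg hx, ih ht hvt]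
      simp [hnx]

-- 2 * sum(range(0, m)) = m * (m - 1)
lemma sum_pyRange_two (m : Nat) :
    2 * (PySem.List.pyRange 0 (m : Int)).sum = (m : Int) * ((m : Int) - 1) := by
  induction m with
  | zero => simp [PySem.List.pyRange]
  | succ k ih =>
    have h : (0 : Int) ≤ (k : Int) := by positivity
    have : ((k + 1 : Nat) : Int) = (k : Int) + 1 := by push_cast; ring
    rw [this, PySem.List.pyRange_one_succ_right h, List.sum_append]
    simp only [List.sum_cons, List.sum_nil]
    linarith [ih]

-- counting ≤ v on the sorted copy equals counting on arr itself
lemma count_le_perm (arr : List Int) (v : Int) :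
    (PySem.List.sorted arr (fun x => x) false).countP (fun x => decide (x ≤ v))
      = arr.countP (fun x => decide (x ≤ v)) :=
  (PySem.List.sorted_perm arr (fun x => x) false).countP_eq _

-- subtracting 1 per element splits off the length
lemma sum_map_sub_one (l : List Int) (f : Int → Int) :
    (l.map (fun v => f v - 1)).sum = (l.map f).sum - (l.length : Int) := by
  induction l with
  | nil => simp
  | cons y ys ih => simp [ih]; ring

-- the running dict of B holds exactly the multiplicities of the processed prefix
lemma tieFold_getD (l : List Int) (v : Int) :
    (pvTieFold l).2.getD v 0 = (l.count v : Int) := by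
  induction l using List.reverseRecOn with
  | nil => simp [pvTieFold, PySem.Dict.getD_empty]
  | append_singleton t x ih =>
    unfold pvTieFold at *
    rw [List.foldl_append, List.foldl_cons, List.foldl_nil]
    simp only []
    rw [PySem.Dict.getD_insert, List.count_append]
    by_cases hvx : v = x
    · subst hvx
      simp [ih]
    · have : [x].count v = 0 := by
        simp [List.count_singleton]
        exact fun h => absurd h.symm hvx
      rw [if_neg hvx, ih, this]
      simp

-- the accumulator of B gains count_l(x) when x is appended
lemma tieFold_fst_append (l : List Int) (x : Int) :
    (pvTieFold (l ++ [x])).1 = (pvTieFold l).1 + (l.count x : Int) := by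
  have h := tieFold_getD l x
  unfold pvTieFold at *
  rw [List.foldl_append, List.foldl_cons, List.foldl_nil]
  simp only []
  rw [h]

-- counting ≤ v and ≥ v together counts every element once plus the copies of v again
lemma countP_le_add_ge (l : List Int) (v : Int) :
    l.countP (fun x => decide (x ≤ v)) + l.countP (fun x => decide (v ≤ x))
      = l.length + l.count v := by
  induction l with
  | nil => simp
  | cons y ys ih =>
    rw [List.countP_cons, List.countP_cons, List.count_cons, List.length_cons]
    by_cases h1 : y ≤ v <;> by_cases h2 : v ≤ y
    · have : y = v := le_antisymm h1 h2
      simp [h1, h2, this]; omega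
    · have : ¬ y = v := fun h => h2 (le_of_eq h.symm)
      simp [h1, h2, this]; omega
    · have : ¬ y = v := fun h => h1 (le_of_eq h)
      simp [h1, h2, this]; omega
    · exact absurd (le_total y v) (by simp [h1, h2])

-- a 0/1 indicator sum is a countP
lemma sum_map_indicator (l : List Int) (y : Int) :
    (l.map (fun v => if y ≤ v then (1 : Int) else 0)).sum
      = (l.countP (fun v => decide (y ≤ v)) : Int) := by
  induction l with
  | nil => simp
  | cons z zs ih =>
    rw [List.map_cons, List.sum_cons, List.countP_cons, ih]
    by_cases h : y ≤ z <;> simp [h] <;> ring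

-- main invariant: twice the "count ≤" sum = m^2 + m + 2 * ties
lemma main_inv (l : List Int) :
    2 * ((l.map (fun v => (l.countP (fun x => decide (x ≤ v)) : Int))).sum)
      = (l.length : Int) * (l.length : Int) + (l.length : Int) + 2 * (pvTieFold l).1 := by
  induction l using List.reverseRecOn with
  | nil => simp [pvTieFold]
  | append_singleton t y ih =>
    have hsplit : ((t ++ [y]).map
          (fun v => ((t ++ [y]).countP (fun x => decide (x ≤ v)) : Int))).sum
        = (t.map (fun v => (t.countP (fun x => decide (x ≤ v)) : Int))).sum
          + (t.countP (fun v => decide (y ≤ v)) : Int)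
          + (t.countP (fun x => decide (x ≤ y)) : Int) + 1 := by
      have hcount : ∀ v : Int, (((t ++ [y]).countP (fun x => decide (x ≤ v)) : Int))
          = (t.countP (fun x => decide (x ≤ v)) : Int) + (if y ≤ v then 1 else 0) := by
        intro v
        rw [List.countP_append]
        by_cases h : y ≤ v <;> simp [h]
      rw [List.map_append, List.sum_append]
      have hmap : (t.map (fun v => ((t ++ [y]).countP (fun x => decide (x ≤ v)) : Int)))
          = t.map (fun v => (t.countP (fun x => decide (x ≤ v)) : Int)
              + (if y ≤ v then (1 : Int) else 0)) := by
        apply List.map_congr_left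
        intro v _
        exact hcount v
      rw [hmap, PySem.List.sum_map_add_int, sum_map_indicator]
      simp only [List.map_cons, List.map_nil, List.sum_cons, List.sum_nil, add_zero]
      rw [hcount y]
      simp [le_refl]
      ring
    have hc := countP_le_add_ge t y
    have hfst := tieFold_fst_append t y
    rw [hsplit, hfst]
    have hlen : ((t ++ [y]).length : Int) = (t.length : Int) + 1 := by
      simp
    rw [hlen]
    have hcInt : (t.countP (fun x => decide (x ≤ y)) : Int)
        + (t.countP (fun x => decide (y ≤ x)) : Int)
        = (t.length : Int) + (t.count y : Int) := by
      exact_mod_cast congrArg (Nat.cast : Nat → Int) hc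
    linarith [ih]

theorem user_logic_equiv (n : Int) (arr : List Int) :
    user_logic n arr = user_logic_alt n arr := by
  unfold user_logic user_logic_alt
  simp only []
  set s := PySem.List.sorted arr (fun x => x) false with hsdef
  set mapp := (PySem.List.enumerate s).foldl
      (fun (d : PySem.Dict Int Int) (p : Int × Int) => d.insert p.2 p.1)
      PySem.Dict.empty with hmapp
  -- A side: split the enumerate sum into the index sum and the dict-lookup sum
  rw [PySem.List.foldl_add (g := fun p : Int × Int => p.1 + mapp.getD p.2 0)]
  rw [PySem.List.sum_map_add_int (f := fun p : Int × Int => p.1)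
        (g := fun p : Int × Int => mapp.getD p.2 0)]
  rw [PySem.List.map_fst_enumerate]
  -- the dict-lookup sum equals the (count ≤ v) - 1 sum
  have hmap : (PySem.List.enumerate arr).map (fun p : Int × Int => mapp.getD p.2 0)
      = arr.map (fun v => (arr.countP (fun x => decide (x ≤ v)) : Int) - 1) := by
    have h1 : (PySem.List.enumerate arr).map (fun p : Int × Int => mapp.getD p.2 0)
        = ((PySem.List.enumerate arr).map (fun p : Int × Int => p.2)).map
            (fun v => mapp.getD v 0) := by
      rw [List.map_map]; rfl
    rw [h1, PySem.List.map_snd_enumerate]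
    apply List.map_congr_left
    intro v hv
    rw [hmapp, hsdef]
    rw [getD_fold_insert _ (PySem.List.sorted_pairwise arr (fun x => x)) v
          (by rw [PySem.List.mem_sorted]; exact hv)]
    rw [count_le_perm]
  rw [hmap]
  rw [sum_map_sub_one arr (fun v => (arr.countP (fun x => decide (x ≤ v)) : Int))]
  have hrange := sum_pyRange_two arr.length
  have hS := main_inv arr
  have hlen : PySem.List.len arr = (arr.length : Int) := rfl
  rw [hlen]
  simp only [zero_add]
  linarith [hrange, hS]

-- ===== VERDICT (by name: the statement is the Claim_ definition above) =====
theorem user_logic_spec : Claim_equal_user_logic := by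
  intro n arr _
  unfold Spec_user_logic
  exact user_logic_equiv n arr
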